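-- pv_equiv track=rewrite | github.com/Hershill/comp-bio-monorepo | CISC471HW5/convolution_cyclopeptide_sequencing.py | linear_score_mass_seq
-- ===== SOURCE A (Python) =====
-- from copy import deepcopy
--
-- def linear_spectrum_mass_seq(peptide):
--     """Return the linear spectrum of a given peptide
--
--     :param peptide: the peptide as a list of amino acid masses
--     :return: theoretical linear spectrum of the peptide
--     """
--
--     theoretical_spectrum = [0]
--
--     for i in range(len(peptide)):
--         sub = peptide[i]
--         theoretical_spectrum.append(sub)
--         for k in range(i + 1, len(peptide)):
--             sub += peptide[k]
--             theoretical_spectrum.append(sub)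
--
--     return sorted(theoretical_spectrum)
--
-- def linear_score_mass_seq(peptide_mass_seq, spectrum):
--     """Score a peptide given a list of amino acid masses
--
--     :param peptide_mass_seq: the peptide as a list of it's amino acidmasses
--     :param spectrum: the spectrum to score the peptide against
--     :return: the score of the peptide
--     """
--
--     if not peptide_mass_seq:
--         return 0
--
--     theoretical_spectrum = linear_spectrum_mass_seq(peptide_mass_seq)
--     spectrum_copy = deepcopy(spectrum)
--     score = 1
--
--     for i in theoretical_spectrum:
--         if i in spectrum_copy:
--             spectrum_copy.remove(i)
--             score += 1
--
--     return score
-- ===== SOURCE B (Python) =====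
-- def linear_score_mass_seq(peptide_mass_seq, spectrum):
--     """Score a peptide (list of masses) against a spectrum: prefix-sum table,
--     theoretical spectrum as prefix differences, counter intersection + 1."""
--     if not peptide_mass_seq:
--         return 0
--
--     prefix = [0]
--     acc = 0
--     for m in peptide_mass_seq:
--         acc += m
--         prefix.append(acc)
--
--     theoretical = [0]
--     for i in range(len(prefix)):
--         for j in range(i + 1, len(prefix)):
--             theoretical.append(prefix[j] - prefix[i])
--
--     spec_count = {}
--     for x in spectrum:
--         spec_count[x] = spec_count.get(x, 0) + 1
--     theo_count = {}
--     for x in theoretical: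
--         theo_count[x] = theo_count.get(x, 0) + 1
--
--     score = 1
--     for v, c in theo_count.items():
--         score += min(c, spec_count.get(v, 0))
--     return score
-- ===== Notes on version B (the rewrite author's own statement) =====
-- stated objective: faster
-- what changed: Replaces the running-accumulator nested loop + sort + repeated list membership/remove scans by a prefix-sum table whose pairwise differences give the linear spectrum, scored via hash counters (multiset intersection) instead of destructive list removal.
import Mathlib
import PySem

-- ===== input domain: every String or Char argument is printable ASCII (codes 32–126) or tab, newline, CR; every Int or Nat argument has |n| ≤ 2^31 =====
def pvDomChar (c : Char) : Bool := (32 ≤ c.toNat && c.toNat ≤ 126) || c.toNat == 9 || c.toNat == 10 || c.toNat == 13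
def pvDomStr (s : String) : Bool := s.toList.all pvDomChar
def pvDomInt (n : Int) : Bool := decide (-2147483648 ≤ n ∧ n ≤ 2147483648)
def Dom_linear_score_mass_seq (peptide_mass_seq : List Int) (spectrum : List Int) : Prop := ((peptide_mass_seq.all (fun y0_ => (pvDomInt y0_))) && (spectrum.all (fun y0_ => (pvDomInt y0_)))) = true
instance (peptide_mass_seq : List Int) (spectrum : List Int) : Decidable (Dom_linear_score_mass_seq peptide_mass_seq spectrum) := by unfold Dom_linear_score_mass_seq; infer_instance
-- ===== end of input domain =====

-- B replaces A's running-accumulator nested loop + sort + repeated list membership/remove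
-- scans by a prefix-sum table (theoretical spectrum = pairwise prefix differences) and
-- counter dictionaries (multiset intersection); objective: faster.

-- ===== PORT A =====
-- helper: linear_spectrum_mass_seq, transliterated
def linear_spectrum_mass_seq (peptide : List Int) : List Int :=
  let theoretical_spectrum :=
    (PySem.List.pyRange 0 (PySem.List.len peptide) 1).foldl
      (fun theoretical_spectrum i =>
        let sub := PySem.List.pyGetD peptide i 0
        let theoretical_spectrum := theoretical_spectrum ++ [sub]
        ((PySem.List.pyRange (i + 1) (PySem.List.len peptide) 1).foldl
          (fun (st : List Int × Int) k =>
            let sub := st.2 + PySem.List.pyGetD peptide k 0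
            (st.1 ++ [sub], sub))
          (theoretical_spectrum, sub)).1)
      [0]
  PySem.List.sorted theoretical_spectrum (fun x => x) false

def linear_score_mass_seq (peptide_mass_seq : List Int) (spectrum : List Int) : Int :=
  if peptide_mass_seq = [] then 0
  else
    let theoretical_spectrum := linear_spectrum_mass_seq peptide_mass_seq
    -- deepcopy(spectrum) is a fresh list with the same Int elements
    let st := theoretical_spectrum.foldl
      (fun (st : Int × List Int) i =>
        if st.2.contains i then (st.1 + 1, (PySem.List.remove? st.2 i).getD st.2)
        else st)
      (1, spectrum)
    st.1

-- ===== PORT B =====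
def linear_score_mass_seq_alt (peptide_mass_seq : List Int) (spectrum : List Int) : Int :=
  if peptide_mass_seq = [] then 0
  else
    let prefixT := (peptide_mass_seq.foldl
      (fun (st : List Int × Int) m =>
        let acc := st.2 + m
        (st.1 ++ [acc], acc))
      ([0], 0)).1
    let theoretical :=
      (PySem.List.pyRange 0 (PySem.List.len prefixT) 1).foldl
        (fun theoretical i =>
          (PySem.List.pyRange (i + 1) (PySem.List.len prefixT) 1).foldl
            (fun theoretical j =>
              theoretical ++ [PySem.List.pyGetD prefixT j 0 - PySem.List.pyGetD prefixT i 0])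
            theoretical)
        [0]
    let spec_count := spectrum.foldl
      (fun (d : PySem.Dict Int Int) x => d.insert x (d.getD x 0 + 1)) PySem.Dict.empty
    let theo_count := theoretical.foldl
      (fun (d : PySem.Dict Int Int) x => d.insert x (d.getD x 0 + 1)) PySem.Dict.empty
    theo_count.items.foldl
      (fun (score : Int) (vc : Int × Int) => score + min vc.2 (spec_count.getD vc.1 0)) 1

-- ===== PRECONDITION & SPEC =====
def Spec_linear_score_mass_seq (peptide_mass_seq : List Int) (spectrum : List Int) (out : Int) : Prop := out = linear_score_mass_seq_alt peptide_mass_seq spectrum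
instance (peptide_mass_seq : List Int) (spectrum : List Int) (out : Int) : Decidable (Spec_linear_score_mass_seq peptide_mass_seq spectrum out) := by unfold Spec_linear_score_mass_seq; infer_instance

-- ===== CLAIM (what is proved, stated in full; the proofs are below) =====
def Claim_equal_linear_score_mass_seq : Prop := ∀ (peptide_mass_seq : List Int) (spectrum : List Int), Dom_linear_score_mass_seq peptide_mass_seq spectrum → Spec_linear_score_mass_seq peptide_mass_seq spectrum (linear_score_mass_seq peptide_mass_seq spectrum)

-- ===== LEMMAS AND PROOFS =====

-- prefix sums of the peptide
def pvP (peptide : List Int) (k : Nat) : Int := (peptide.take k).sum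
-- the block of window sums starting at i, and the whole theoretical list (A's, pre-sort)
def pvBlock (peptide : List Int) (i : Nat) : List Int :=
  (List.range (peptide.length - i)).map (fun t => pvP peptide (i + t + 1) - pvP peptide i)
def pvTheo (peptide : List Int) : List Int :=
  0 :: (List.range peptide.length).flatMap (pvBlock peptide)

theorem pvP_succ (peptide : List Int) (j : Nat) (h : j < peptide.length) :
    pvP peptide (j + 1) = pvP peptide j + peptide.getD j 0 := by
  unfold pvP
  rw [List.sum_take_succ peptide j h]
  simp [List.getD, List.getElem?_eq_getElem h]

-- A's inner running-sum loop
theorem pvInnerA (peptide : List Int) :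
    ∀ (c j : Nat) (acc : List Int) (sub : Int), j + c = peptide.length →
    ((PySem.List.pyRange (j : Int) (peptide.length : Int) 1).foldl
      (fun (st : List Int × Int) k =>
        let sub := st.2 + PySem.List.pyGetD peptide k 0
        (st.1 ++ [sub], sub))
      (acc, sub)).1
    = acc ++ (List.range c).map (fun t => sub + (pvP peptide (j + t + 1) - pvP peptide j)) := by
  intro c
  induction c with
  | zero =>
      intro j acc sub h
      rw [PySem.List.pyRange_one_eq_nil (by omega)]
      simp
  | succ c ih =>
      intro j acc sub h
      rw [PySem.List.pyRange_one_cons (by exact_mod_cast by omega : (j:Int) < (peptide.length:Int))]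
      simp only [List.foldl_cons]
      have hj : j < peptide.length := by omega
      have hg : PySem.List.pyGetD peptide (j : Int) 0 = peptide.getD j 0 := by
        simp
      have hcast : (j : Int) + 1 = ((j + 1 : Nat) : Int) := by push_cast; ring
      rw [hcast, ih (j + 1) _ _ (by omega)]
      rw [List.range_succ_eq_map, List.map_cons, List.map_map, List.append_assoc,
        List.singleton_append]
      congr 1
      congr 1
      · rw [hg, pvP_succ peptide j hj]; ring_nf
      apply List.map_congr_left
      intro t _
      simp only [Function.comp_apply]
      rw [hg, pvP_succ peptide j hj]
      have h2 : j + 1 + t + 1 = j + (t + 1) + 1 := by omega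
      rw [h2]
      ring

-- A's theoretical list, before sorting, is pvTheo
theorem pvTheoA (peptide : List Int) :
    (PySem.List.pyRange 0 (PySem.List.len peptide) 1).foldl
      (fun theoretical_spectrum i =>
        let sub := PySem.List.pyGetD peptide i 0
        let theoretical_spectrum := theoretical_spectrum ++ [sub]
        ((PySem.List.pyRange (i + 1) (PySem.List.len peptide) 1).foldl
          (fun (st : List Int × Int) k =>
            let sub := st.2 + PySem.List.pyGetD peptide k 0
            (st.1 ++ [sub], sub))
          (theoretical_spectrum, sub)).1)
      [0] = pvTheo peptide := by
  rw [PySem.List.len_eq, PySem.List.pyRange_zero_natCast, List.foldl_map]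
  refine (PySem.List.foldl_congr_mem _ _ (fun acc (k : Nat) => acc ++ pvBlock peptide k) _ ?_).trans ?_
  swap
  · rw [PySem.List.foldl_append_eq_flatMap]
    rfl
  intro acc k hk
  rw [List.mem_range] at hk
  simp only
  have hcast : (k : Int) + 1 = ((k + 1 : Nat) : Int) := by push_cast; ring
  rw [hcast, pvInnerA peptide (peptide.length - (k+1)) (k+1) _ _ (by omega)]
  have hg : PySem.List.pyGetD peptide (k : Int) 0 = peptide.getD k 0 := by simp
  rw [List.append_assoc, List.singleton_append]
  unfold pvBlock
  have hn : peptide.length - k = (peptide.length - (k+1)) + 1 := by omega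
  rw [hn, List.range_succ_eq_map, List.map_cons, List.map_map]
  congr 1
  congr 1
  · rw [hg, pvP_succ peptide k hk]; ring_nf
  apply List.map_congr_left
  intro t _
  simp only [Function.comp_apply]
  rw [hg, pvP_succ peptide k hk]
  have h2 : k + 1 + t + 1 = k + (t + 1) + 1 := by omega
  rw [h2]
  ring

-- B's prefix-building loop
theorem pvPrefixFold (l : List Int) :
    ∀ (p0 : List Int) (a : Int),
    (l.foldl (fun (st : List Int × Int) m => (st.1 ++ [st.2 + m], st.2 + m)) (p0, a)).1
      = p0 ++ (List.range l.length).map (fun k => a + (l.take (k + 1)).sum) := by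
  induction l with
  | nil => intro p0 a; simp
  | cons m l ih =>
      intro p0 a
      simp only [List.foldl_cons]
      rw [ih, List.length_cons, List.range_succ_eq_map, List.map_cons, List.map_map,
        List.append_assoc, List.singleton_append]
      congr 1
      congr 1
      · simp
      apply List.map_congr_left
      intro t _
      simp only [Function.comp_apply, List.take_succ_cons, List.sum_cons]
      ring

theorem pvPrefixEq (peptide : List Int) :
    (peptide.foldl (fun (st : List Int × Int) m => (st.1 ++ [st.2 + m], st.2 + m)) ([0], 0)).1
      = (List.range (peptide.length + 1)).map (pvP peptide) := by
  rw [pvPrefixFold, List.range_succ_eq_map, List.map_cons, List.map_map]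
  unfold pvP
  simp

-- B's theoretical list is pvTheo too
theorem pvTheoB (peptide : List Int) (prefixT : List Int)
    (hp : prefixT = (List.range (peptide.length + 1)).map (pvP peptide)) :
    (PySem.List.pyRange 0 (PySem.List.len prefixT) 1).foldl
      (fun theoretical i =>
        (PySem.List.pyRange (i + 1) (PySem.List.len prefixT) 1).foldl
          (fun theoretical j =>
            theoretical ++ [PySem.List.pyGetD prefixT j 0 - PySem.List.pyGetD prefixT i 0])
          theoretical)
      [0] = pvTheo peptide := by
  have hlen : prefixT.length = peptide.length + 1 := by rw [hp]; simp
  rw [PySem.List.len_eq, hlen, PySem.List.pyRange_zero_natCast, List.foldl_map]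
  refine (PySem.List.foldl_congr_mem _ _ (fun acc (k : Nat) => acc ++ pvBlock peptide k) _ ?_).trans ?_
  swap
  · rw [PySem.List.foldl_append_eq_flatMap]
    unfold pvTheo
    rw [List.range_succ, List.flatMap_append]
    have hnil : pvBlock peptide peptide.length = [] := by
      unfold pvBlock; simp
    simp [hnil]
  intro acc k hk
  rw [List.mem_range] at hk
  simp only
  rw [PySem.List.foldl_append_singleton_eq_map]
  congr 1
  have hcast : (k : Int) + 1 = ((k + 1 : Nat) : Int) := by push_cast; ring
  rw [hcast, PySem.List.pyRange_one]
  have htn : ((((peptide.length + 1 : Nat)) : Int) - ((k + 1 : Nat) : Int)).toNat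
      = peptide.length - k := by omega
  rw [htn, List.map_map]
  unfold pvBlock
  apply List.map_congr_left
  intro t ht
  rw [List.mem_range] at ht
  simp only [Function.comp_apply]
  have h1 : ((k + 1 : Nat) : Int) + (t : Int) = ((k + 1 + t : Nat) : Int) := by push_cast; ring
  rw [h1]
  rw [PySem.List.pyGetD_natCast, PySem.List.pyGetD_natCast, hp,
    PySem.List.getD_map_range _ _ _ _ (by omega), PySem.List.getD_map_range _ _ _ _ (by omega)]
  have h2 : k + 1 + t = k + t + 1 := by omega
  rw [h2]

-- A's scan-and-remove loop counts the multiset intersection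
theorem pvScanA (t : List Int) :
    ∀ (s : List Int) (sc : Int),
    (t.foldl
      (fun (st : Int × List Int) i =>
        if st.2.contains i then (st.1 + 1, (PySem.List.remove? st.2 i).getD st.2)
        else st)
      (sc, s)).1 = sc + (((t : Multiset Int) ∩ (s : Multiset Int)).card : Int) := by
  induction t with
  | nil => intro s sc; simp
  | cons a t ih =>
      intro s sc
      simp only [List.foldl_cons]
      by_cases h : a ∈ s
      · rw [if_pos (by simpa using h)]
        rw [PySem.List.remove?_eq_some_erase s a h]
        simp only [Option.getD_some]
        rw [ih]
        have hms : ((a :: t : List Int) : Multiset Int) ∩ (s : Multiset Int)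
            = a ::ₘ ((t : Multiset Int) ∩ ((s.erase a : List Int) : Multiset Int)) := by
          rw [← Multiset.cons_coe, Multiset.cons_inter_of_pos _ (by simpa using h)]
          congr 1
        rw [hms]
        simp only [Multiset.card_cons]
        push_cast
        ring
      · rw [if_neg (by simpa using h)]
        rw [ih]
        have hms : ((a :: t : List Int) : Multiset Int) ∩ (s : Multiset Int)
            = (t : Multiset Int) ∩ (s : Multiset Int) := by
          rw [← Multiset.cons_coe, Multiset.cons_inter_of_neg _ (by simpa using h)]
        rw [hms]

-- the multiset-intersection size as a sum over the distinct values of t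
theorem pvInterCard (t s : List Int) :
    (((t : Multiset Int) ∩ (s : Multiset Int)).card : Int)
      = ((PySem.Set.ofList t).map (fun v => min ((t.count v : Int)) ((s.count v : Int)))).sum := by
  have h1 : ((t : Multiset Int) ∩ (s : Multiset Int)).card
      = ∑ a ∈ t.toFinset, min (t.count a) (s.count a) := by
    rw [← Multiset.toFinset_sum_count_eq]
    rw [Finset.sum_subset (h := ?_) (hf := ?_)]
    · apply Finset.sum_congr rfl
      intro a _
      rw [Multiset.count_inter]
      simp
    · intro a ha
      simp only [Multiset.mem_toFinset] at ha
      simp only [List.mem_toFinset]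
      exact (Multiset.mem_inter.mp ha).1
    · intro a _ ha
      rw [Multiset.count_eq_zero]
      simpa using ha
  rw [h1]
  have h2 : PySem.Set.ofList t = PySem.List.dedup t := (PySem.List.dedup_eq_ofList t).symm
  have h3 : (PySem.List.dedup t).toFinset = t.toFinset := by
    apply Finset.ext
    intro a
    simp
  rw [h2]
  rw [show ((PySem.List.dedup t).map (fun v => min ((t.count v : Int)) ((s.count v : Int)))).sum
      = (PySem.List.dedup t).toFinset.sum (fun v => min ((t.count v : Int)) ((s.count v : Int)))
    from (List.sum_toFinset _ (PySem.List.nodup_dedup t)).symm]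
  rw [h3]
  rw [Nat.cast_sum]
  apply Finset.sum_congr rfl
  intro a _
  push_cast
  rfl

-- ===== VERDICT (by name: the statement is the Claim_ definition above) =====
theorem linear_score_mass_seq_spec : Claim_equal_linear_score_mass_seq := by
  intro peptide spectrum _
  unfold Spec_linear_score_mass_seq
  by_cases hp : peptide = []
  · simp [linear_score_mass_seq, linear_score_mass_seq_alt, hp]
  · simp only [linear_score_mass_seq, linear_score_mass_seq_alt, if_neg hp]
    -- A side
    have hA : linear_spectrum_mass_seq peptide
        = PySem.List.sorted (pvTheo peptide) (fun x => x) false := by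
      unfold linear_spectrum_mass_seq
      rw [pvTheoA]
    rw [hA, pvScanA]
    have hperm : ((PySem.List.sorted (pvTheo peptide) (fun x => x) false : List Int) : Multiset Int)
        = ((pvTheo peptide : List Int) : Multiset Int) :=
      Multiset.coe_eq_coe.mpr (PySem.List.sorted_perm _ _ _)
    rw [hperm]
    -- B side
    rw [pvPrefixEq, pvTheoB peptide _ rfl]
    rw [PySem.Dict.foldl_insert_getD_add_one_eq_counter,
      PySem.Dict.foldl_insert_getD_add_one_eq_counter]
    rw [PySem.Dict.items_counter (pvTheo peptide)]
    rw [List.foldl_map]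
    rw [PySem.List.foldl_add]
    rw [pvInterCard]
    congr 1
    refine congrArg List.sum ?_
    apply List.map_congr_left
    intro v _
    simp [PySem.Dict.getD_counter]
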